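-- pv_equiv track=rewrite | github.com/codyhartsook/kv-store | test/node.py | even_distribution
-- ===== SOURCE A (Python) =====
-- def even_distribution(repl_factor, nodes):
--
-- 	nodes.sort()
-- 	num_shards = (len(nodes) // repl_factor)
-- 	replicas = (len(nodes) // num_shards)
-- 	overflow = (len(nodes) % num_shards)
--
-- 	shards = [[] for i in range(0, num_shards)]
--
-- 	node_iter = 0
-- 	for shard in range(num_shards):
-- 		extra = (1 if shard < overflow else 0)
-- 		interval = replicas + extra
--
-- 		shards[shard] = nodes[node_iter:(node_iter+interval)]
-- 		node_iter += interval
--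
-- 	return shards
-- ===== SOURCE B (Python) =====
-- # Same-name re-implementation: fills each shard element-by-element with a running
-- # node index instead of slice assignment into a pre-built list of empty shards.
-- # Like A, it sorts `nodes` in place (same observable mutation) and raises the
-- # same ZeroDivisionError when repl_factor == 0 or len(nodes) // repl_factor == 0.
-- def even_distribution(repl_factor, nodes):
--     nodes.sort()
--     n = len(nodes)
--     num_shards = n // repl_factor
--     replicas = n // num_shards
--     overflow = n % num_shards
--     shards = []
--     i = 0
--     for shard in range(num_shards):
--         cap = replicas + (1 if shard < overflow else 0)
--         group = []
--         for _ in range(cap):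
--             group.append(nodes[i])
--             i += 1
--         shards.append(group)
--     return shards
-- ===== Notes on version B (the rewrite author's own statement) =====
-- stated objective: alternative
-- what changed: B builds the result by appending shards one at a time and filling each shard element-by-element with a running node index, instead of pre-allocating a list of empty shards and overwriting each slot with a slice of the node list.
import Mathlib
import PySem

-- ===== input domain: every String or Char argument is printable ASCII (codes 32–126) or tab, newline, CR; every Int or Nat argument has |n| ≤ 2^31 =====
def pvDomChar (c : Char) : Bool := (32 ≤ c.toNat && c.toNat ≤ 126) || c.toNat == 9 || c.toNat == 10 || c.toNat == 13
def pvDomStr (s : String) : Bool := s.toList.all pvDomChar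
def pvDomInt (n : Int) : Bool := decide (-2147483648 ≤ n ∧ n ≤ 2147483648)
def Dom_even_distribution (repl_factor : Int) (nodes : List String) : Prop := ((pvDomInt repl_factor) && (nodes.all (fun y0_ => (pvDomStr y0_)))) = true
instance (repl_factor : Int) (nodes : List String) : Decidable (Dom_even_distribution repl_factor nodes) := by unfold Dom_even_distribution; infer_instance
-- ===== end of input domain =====

-- B fills each shard element-by-element with a running node index instead of
-- A's slice assignment into a pre-built list of empty shards (objective: alternative).
-- Both Pythons sort `nodes` in place; the equivalence proved is about the return value.

-- ===== PORT A =====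
-- loop body of A's `for shard in range(num_shards)`
def pvStepA (ns : List String) (replicas overflow : Int)
    (st : List (List String) × Int) (shard : Int) : List (List String) × Int :=
  let extra : Int := if shard < overflow then 1 else 0
  let interval := replicas + extra
  (st.1.set shard.toNat (PySem.List.slice ns (some st.2) (some (st.2 + interval))), st.2 + interval)

def even_distribution (repl_factor : Int) (nodes : List String) : List (List String) :=
  let ns := PySem.List.sorted nodes (fun x => x) false
  let n : Int := ns.length
  let num_shards := PySem.Int.floordiv n repl_factor
  let replicas := PySem.Int.floordiv n num_shards
  let overflow := PySem.Int.mod n num_shards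
  let shards := (PySem.List.pyRange 0 num_shards 1).map (fun _ => ([] : List String))
  ((PySem.List.pyRange 0 num_shards 1).foldl (pvStepA ns replicas overflow) (shards, 0)).1

-- ===== PORT B =====
-- body of B's inner `for _ in range(cap)` (nodes[i] stays in range inside Pre_, see proof)
def pvStepInnerB (ns : List String) (gi : List String × Int) (_x : Int) : List String × Int :=
  (gi.1 ++ [PySem.List.pyGetD ns gi.2 ""], gi.2 + 1)

-- loop body of B's `for shard in range(num_shards)`
def pvStepB (ns : List String) (replicas overflow : Int)
    (st : List (List String) × Int) (shard : Int) : List (List String) × Int :=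
  let cap := replicas + (if shard < overflow then 1 else 0)
  let gi := (PySem.List.pyRange 0 cap 1).foldl (pvStepInnerB ns) (([] : List String), st.2)
  (st.1 ++ [gi.1], gi.2)

def even_distribution_alt (repl_factor : Int) (nodes : List String) : List (List String) :=
  let ns := PySem.List.sorted nodes (fun x => x) false
  let n : Int := ns.length
  let num_shards := PySem.Int.floordiv n repl_factor
  let replicas := PySem.Int.floordiv n num_shards
  let overflow := PySem.Int.mod n num_shards
  ((PySem.List.pyRange 0 num_shards 1).foldl (pvStepB ns replicas overflow) ([], 0)).1

-- ===== PRECONDITION & SPEC =====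
-- A raises ZeroDivisionError when repl_factor == 0 or len(nodes) // repl_factor == 0;
-- exactly those inputs are excluded.
def Pre_even_distribution (repl_factor : Int) (nodes : List String) : Prop :=
  repl_factor ≠ 0 ∧ PySem.Int.floordiv (nodes.length : Int) repl_factor ≠ 0
instance (repl_factor : Int) (nodes : List String) : Decidable (Pre_even_distribution repl_factor nodes) := by
  unfold Pre_even_distribution; infer_instance

def pvWitness_even_distribution : Int × List String := (1, ["b", "a"])

def Spec_even_distribution (repl_factor : Int) (nodes : List String) (out : List (List String)) : Prop := out = even_distribution_alt repl_factor nodes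
instance (repl_factor : Int) (nodes : List String) (out : List (List String)) : Decidable (Spec_even_distribution repl_factor nodes out) := by unfold Spec_even_distribution; infer_instance

-- ===== CLAIM (what is proved, stated in full; the proofs are below) =====
def Claim_equal_even_distribution : Prop := ∀ (repl_factor : Int) (nodes : List String), Dom_even_distribution repl_factor nodes → Pre_even_distribution repl_factor nodes → Spec_even_distribution repl_factor nodes (even_distribution repl_factor nodes)

-- ===== LEMMAS AND PROOFS =====

-- B's inner loop over a range of length `cap` collects ns[i:i+cap] and advances i by cap.
lemma pvInner_go (ns : List String) (l : List Int) (g : List String) (i : Nat)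
    (h : i + l.length ≤ ns.length) :
    l.foldl (pvStepInnerB ns) (g, (i : Int))
      = (g ++ (ns.drop i).take l.length, (i : Int) + l.length) := by
  induction l generalizing g i with
  | nil => simp
  | cons x t ih =>
    simp only [List.length_cons] at h
    have hi : i < ns.length := by omega
    have hdrop : ns.drop i = ns[i] :: ns.drop (i + 1) := List.drop_eq_getElem_cons hi
    have hget : PySem.List.pyGetD ns (i : Int) "" = ns[i] := by
      rw [PySem.List.pyGetD_natCast]
      exact List.getD_eq_getElem _ _ hi
    have hstep : pvStepInnerB ns (g, (i : Int)) x = (g ++ [ns[i]], ((i + 1 : Nat) : Int)) := by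
      simp [pvStepInnerB, hget]
    rw [List.foldl_cons, hstep, ih _ (i + 1) (by omega)]
    simp only [Prod.mk.injEq]
    constructor
    · simp only [List.length_cons, List.append_assoc, List.singleton_append]
      rw [hdrop, List.take_succ_cons]
    · simp only [List.length_cons]
      push_cast
      ring

-- the joint invariant of the two outer loops, by induction on the number of completed shards
lemma pvMain_go (ns : List String) (replicas overflow : Int) (S : Nat)
    (hrep : 1 ≤ replicas) (hov0 : 0 ≤ overflow)
    (hn : replicas * (S : Int) + overflow = (ns.length : Int)) :
    ∀ (k : Nat), k ≤ S →
    ∃ (G : List (List String)) (pos : Nat),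
      (PySem.List.pyRange 0 (k : Int) 1).foldl (pvStepA ns replicas overflow)
          (List.replicate S ([] : List String), 0)
        = (G ++ List.replicate (S - k) ([] : List String), (pos : Int)) ∧
      (PySem.List.pyRange 0 (k : Int) 1).foldl (pvStepB ns replicas overflow) ([], 0)
        = (G, (pos : Int)) ∧
      G.length = k ∧ (pos : Int) = replicas * (k : Int) + min (k : Int) overflow := by
  intro k
  induction k with
  | zero =>
    intro _
    refine ⟨[], 0, ?_, ?_, rfl, by omega⟩ <;> simp
  | succ k ih =>
    intro hk1
    obtain ⟨G, pos, hA, hB, hG, hpos⟩ := ih (by omega)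
    -- split the range at k
    have hsplit : PySem.List.pyRange 0 ((k + 1 : Nat) : Int) 1
        = PySem.List.pyRange 0 (k : Int) 1 ++ [(k : Int)] := by
      have := PySem.List.pyRange_one_succ_right (a := 0) (b := (k : Int)) (by positivity)
      push_cast
      rw [this]
    -- the capacity of shard k, as a Nat
    set capN : Nat := replicas.toNat + (if (k : Int) < overflow then 1 else 0) with hcapN
    have hcap : ((capN : Int)) = replicas + (if (k : Int) < overflow then 1 else 0) := by
      rcases le_or_gt overflow (k : Int) with h | h <;>
        simp [hcapN, h, not_lt.mpr] <;> omega
    -- bound: pos + capN ≤ ns.length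
    have hmul : replicas * ((k : Int) + 1) ≤ replicas * (S : Int) := by
      have hkS : ((k : Int) + 1) ≤ (S : Int) := by exact_mod_cast hk1
      exact mul_le_mul_of_nonneg_left hkS (by omega)
    have hbound : pos + capN ≤ ns.length := by
      have h1 : (pos : Int) + (capN : Int) ≤ (ns.length : Int) := by
        rw [hpos, hcap]
        rcases lt_or_ge (k : Int) overflow with h | h
        · have hmin : min (k : Int) overflow = (k : Int) := by omega
          rw [hmin]
          simp only [if_pos h]
          nlinarith
        · have hmin : min (k : Int) overflow = overflow := by omega
          rw [hmin]
          simp only [if_neg (not_lt.mpr h)]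
          nlinarith
      exact_mod_cast h1
    -- inner fold of B at shard k
    have hlen : (PySem.List.pyRange 0 ((capN : Int)) 1).length = capN := by
      rw [PySem.List.length_pyRange_one]
      simp
    have hinner := pvInner_go ns (PySem.List.pyRange 0 ((capN : Int)) 1) [] pos
      (by rw [hlen]; exact hbound)
    rw [hlen] at hinner
    -- slice of A at shard k equals the same segment
    have hslice : PySem.List.slice ns (some ((pos : Nat) : Int))
        (some (((pos : Nat) : Int) + ((capN : Nat) : Int))) = (ns.drop pos).take capN :=
      PySem.List.slice_natCast_add ns pos capN
    refine ⟨G ++ [(ns.drop pos).take capN], pos + capN, ?_, ?_, by simp [hG], ?_⟩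
    · rw [hsplit, List.foldl_append, hA]
      simp only [List.foldl_cons, List.foldl_nil, pvStepA]
      have hrep1 : S - k = (S - (k + 1)) + 1 := by omega
      simp only [Int.toNat_natCast]
      rw [hrep1, List.replicate_succ]
      rw [List.set_append_right _ _ (by omega)]
      simp only [hG, Nat.sub_self, List.set_cons_zero]
      rw [← hcap, hslice]
      simp only [Prod.mk.injEq]
      constructor
      · simp
      · push_cast
        ring
    · rw [hsplit, List.foldl_append, hB]
      simp only [List.foldl_cons, List.foldl_nil, pvStepB]
      rw [← hcap, hinner]
      simp only [List.nil_append, Prod.mk.injEq]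
      constructor
      · trivial
      · push_cast
        ring
    · push_cast
      rw [hcap, hpos]
      rcases lt_or_ge (k : Int) overflow with h | h
      · rw [if_pos h, min_eq_left (le_of_lt h),
          min_eq_left (by omega : (k : Int) + 1 ≤ overflow)]
        ring
      · rw [if_neg (not_lt.mpr h), min_eq_right h,
          min_eq_right (by omega : overflow ≤ (k : Int) + 1)]
        ring

-- ===== VERDICT (by name: the statement is the Claim_ definition above) =====
theorem even_distribution_spec : Claim_equal_even_distribution := by
  intro repl nodes _ hpre
  obtain ⟨hr0, hs0⟩ := hpre
  unfold Spec_even_distribution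
  simp only [even_distribution, even_distribution_alt]
  set ns := PySem.List.sorted nodes (fun x => x) false with hns
  have hlen : ns.length = nodes.length := by
    rw [hns]; exact PySem.List.length_sorted nodes (fun x => x) false
  set num_shards := PySem.Int.floordiv (ns.length : Int) repl with hnum
  have hs0' : num_shards ≠ 0 := by rw [hnum, hlen]; exact hs0
  rcases le_or_gt num_shards 0 with hneg | hposS
  · -- num_shards < 0: both loops are over the empty range, both return []
    have hnil : PySem.List.pyRange 0 num_shards 1 = [] :=
      PySem.List.pyRange_one_eq_nil (by omega)
    rw [hnil]
    simp
  · -- num_shards > 0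
    set replicas := PySem.Int.floordiv (ns.length : Int) num_shards with hrepl
    set overflow := PySem.Int.mod (ns.length : Int) num_shards with hov
    have hfm := PySem.Int.floordiv_mul_add_mod ((ns.length : Int)) num_shards
    rw [← hrepl, ← hov] at hfm
    have hm0 : 0 ≤ overflow := by rw [hov]; exact PySem.Int.mod_nonneg _ hposS
    have hmS : overflow < num_shards := by rw [hov]; exact PySem.Int.mod_lt _ hposS
    have hnn : (0 : Int) ≤ (ns.length : Int) := by positivity
    have hSn : num_shards ≤ (ns.length : Int) := by
      rcases lt_or_ge repl 0 with h | h
      · exfalso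
        have hfm' := PySem.Int.floordiv_mul_add_mod ((ns.length : Int)) repl
        have hmb := PySem.Int.mod_neg_bounds ((ns.length : Int)) h
        rw [← hnum] at hfm'
        nlinarith [hmb.1, hmb.2, hposS, hnn]
      · have hrpos : 0 < repl := by omega
        have hlt : num_shards < (ns.length : Int) + 1 := by
          rw [hnum, PySem.Int.floordiv_lt_iff_lt_mul hrpos]
          nlinarith
        omega
    have hrep1 : 1 ≤ replicas := by
      rw [hrepl, PySem.Int.le_floordiv_iff_mul_le hposS]
      omega
    set S : Nat := num_shards.toNat with hS
    have hSc : (S : Int) = num_shards := by rw [hS]; omega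
    have hmain := pvMain_go ns replicas overflow S hrep1 hm0
      (by rw [hSc]; omega) S le_rfl
    obtain ⟨G, pos, hA, hB, _, _⟩ := hmain
    rw [hSc] at hA hB
    have hinit : (PySem.List.pyRange 0 num_shards 1).map (fun _ => ([] : List String))
        = List.replicate S ([] : List String) := by
      rw [List.map_const']
      congr 1
      rw [PySem.List.length_pyRange_one]
      simp [hS]
    rw [hinit, hA, hB]
    simp
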